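-- pv_equiv track=rewrite | github.com/lakinsm/slss-asffast | bin/samscore/samscore.py | score_cigar
-- ===== SOURCE A (Python) =====
-- def score_cigar(s, t_idx, match=2, mismatch=-4, indel_start=-2, indel_extend=-1):
-- 	"""
-- 	Parse SAM CIGAR alignment string and return reference indices for matches, mismatches, insertions, and deletions.
-- 	All indices are zero-indexed.  The score is calculated with respect to each position in the reference genome.
-- 	The overall read-wise score is the sum of the first tuple.  This score should roughly correlate with alignment
-- 	scores from seed-and-extend aligners.
-- 	:param s: STR, CIGAR string
-- 	:param t_idx: INT, zero-based index for target start position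
-- 	:param match: INT, score/penalty for an alignment match (match of sequence to reference)
-- 	:param mismatch: INT, score/penalty for an alignment mismatch (mismatch of sequence to reference)
-- 	:param indel_start: INT, score/penalty for starting an insertion/deletion event
-- 	:param indel_extend: INT, score/penalty for extension of an existing insertion/deletion event
-- 	:return: tuple of tuples/lists of integers, (score, [idx_scores], (match_idxs,), (mismatch_idxs,), (insert_idxs,), (delete_idxs,))
-- 	"""
-- 	score = 0
-- 	idx_scores = []
-- 	match_idxs = tuple()
-- 	mismatch_idxs = tuple()
-- 	insert_idxs = tuple()
-- 	delete_idxs = tuple()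
-- 	num = ''
-- 	c_idx = 0
-- 	start_idx = t_idx
-- 	while c_idx < len(s):
-- 		if s[c_idx].isdigit():
-- 			num += s[c_idx]
-- 		else:
-- 			op = s[c_idx]
-- 			if op == 'M' or op == '=':
-- 				match_idxs += tuple(range(t_idx, t_idx + int(num)))
-- 				idx_scores += [match for _ in range(int(num))]
-- 				score += match * int(num)
-- 				t_idx += int(num)
-- 			elif op == 'D':
-- 				delete_idxs += tuple(range(t_idx, t_idx + int(num)))
-- 				idx_scores += [indel_start]
-- 				idx_scores += [indel_extend for _ in range(int(num) - 1)]
-- 				score += (indel_extend * (int(num) - 1)) + indel_start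
-- 				t_idx += int(num)
-- 			elif op == 'N' or op == 'X':
-- 				mismatch_idxs += tuple(range(t_idx, t_idx + int(num)))
-- 				idx_scores += [mismatch for _ in range(int(num))]
-- 				score += mismatch + int(num)
-- 				t_idx += int(num)
-- 			elif op == 'I':
-- 				insert_cost = (indel_extend * (int(num) - 1)) + indel_start
-- 				insert_idxs += (t_idx,)
-- 				idx_scores[-1] += insert_cost
-- 				score += insert_cost
-- 			num = ''
-- 		c_idx += 1
-- 	assert ((t_idx - start_idx) == len(idx_scores))
-- 	return score, idx_scores, match_idxs, mismatch_idxs, insert_idxs, delete_idxs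
-- ===== SOURCE B (Python) =====
-- import re
--
-- def score_cigar(s, t_idx, match=2, mismatch=-4, indel_start=-2, indel_extend=-1):
-- 	score = 0
-- 	idx_scores = []
-- 	match_idxs = tuple()
-- 	mismatch_idxs = tuple()
-- 	insert_idxs = tuple()
-- 	delete_idxs = tuple()
-- 	start_idx = t_idx
-- 	for m in re.finditer(r'(\d*)(\D)', s):
-- 		num, op = m.group(1), m.group(2)
-- 		if op == 'M' or op == '=':
-- 			n = int(num)
-- 			match_idxs += tuple(range(t_idx, t_idx + n))
-- 			idx_scores += [match] * n
-- 			score += match * n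
-- 			t_idx += n
-- 		elif op == 'D':
-- 			n = int(num)
-- 			delete_idxs += tuple(range(t_idx, t_idx + n))
-- 			idx_scores += [indel_start] + [indel_extend] * (n - 1)
-- 			score += indel_extend * (n - 1) + indel_start
-- 			t_idx += n
-- 		elif op == 'N' or op == 'X':
-- 			n = int(num)
-- 			mismatch_idxs += tuple(range(t_idx, t_idx + n))
-- 			idx_scores += [mismatch] * n
-- 			score += mismatch + n
-- 			t_idx += n
-- 		elif op == 'I':
-- 			n = int(num)
-- 			insert_cost = indel_extend * (n - 1) + indel_start
-- 			insert_idxs += (t_idx,)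
-- 			idx_scores[-1] += insert_cost
-- 			score += insert_cost
-- 	assert (t_idx - start_idx) == len(idx_scores)
-- 	return score, idx_scores, match_idxs, mismatch_idxs, insert_idxs, delete_idxs
-- ===== Notes on version B (the rewrite author's own statement) =====
-- stated objective: idiomatic
-- what changed: Replaces A's character-by-character index loop with a digit accumulator and per-character state updates by an upfront regex tokenization (re.finditer(r'(\d*)(\D)', s)) into (count, op) pairs followed by a single loop over the tokens.
import Mathlib
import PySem

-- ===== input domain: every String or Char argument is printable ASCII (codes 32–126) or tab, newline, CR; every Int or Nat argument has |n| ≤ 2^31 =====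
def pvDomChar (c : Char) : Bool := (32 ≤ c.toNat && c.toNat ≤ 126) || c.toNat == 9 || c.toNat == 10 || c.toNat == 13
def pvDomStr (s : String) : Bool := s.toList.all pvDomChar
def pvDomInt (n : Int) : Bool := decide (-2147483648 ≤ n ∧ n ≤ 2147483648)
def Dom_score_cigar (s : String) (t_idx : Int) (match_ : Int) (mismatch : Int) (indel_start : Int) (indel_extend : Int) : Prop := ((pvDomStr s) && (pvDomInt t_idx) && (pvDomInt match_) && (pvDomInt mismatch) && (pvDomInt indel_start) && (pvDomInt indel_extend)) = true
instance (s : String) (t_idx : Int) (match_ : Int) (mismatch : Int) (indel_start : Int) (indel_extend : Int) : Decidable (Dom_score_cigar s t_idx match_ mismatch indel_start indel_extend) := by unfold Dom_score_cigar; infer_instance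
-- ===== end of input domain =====

-- B replaces A's character-index while-loop with a digit accumulator by an upfront tokenization of the
-- CIGAR string into (count, op) pairs (re.finditer(r'(\d*)(\D)', s) in Python) followed by one loop over
-- the tokens; objective: more idiomatic decomposition, same cost, same return value wherever A returns.

-- ===== PORT A =====
-- int(num) for A's accumulated digit string; none (= Python ValueError on num == '') defaulted, excluded by Pre_
def pvIntA (num : List Char) : Int := (PySem.Int.ofChars? num).getD 0

-- idx_scores[-1] += v; Python raises IndexError on [], excluded by Pre_ (port returns xs unchanged there)
def pvBumpLastA (xs : List Int) (v : Int) : List Int :=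
  match PySem.List.pyGet? xs (-1) with
  | some last => xs.dropLast ++ [last + v]
  | none => xs

-- A's while-loop over character positions, carrying the digit accumulator `num` and all six results
def pvLoopA (cs : List Char) (num : List Char) (score : Int)
    (idx_scores match_idxs mismatch_idxs insert_idxs delete_idxs : List Int) (t_idx : Int)
    (match_ mismatch indel_start indel_extend : Int) :
    Int × List Int × List Int × List Int × List Int × List Int :=
  match cs with
  | [] => (score, idx_scores, match_idxs, mismatch_idxs, insert_idxs, delete_idxs)
  | c :: rest =>
    if c.isDigit then
      pvLoopA rest (num ++ [c]) score idx_scores match_idxs mismatch_idxs insert_idxs delete_idxs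
        t_idx match_ mismatch indel_start indel_extend
    else if c = 'M' ∨ c = '=' then
      pvLoopA rest [] (score + match_ * pvIntA num)
        (idx_scores ++ List.replicate (pvIntA num).toNat match_)
        (match_idxs ++ PySem.List.pyRange t_idx (t_idx + pvIntA num) 1)
        mismatch_idxs insert_idxs delete_idxs
        (t_idx + pvIntA num) match_ mismatch indel_start indel_extend
    else if c = 'D' then
      pvLoopA rest [] (score + (indel_extend * (pvIntA num - 1) + indel_start))
        (idx_scores ++ [indel_start] ++ List.replicate (pvIntA num - 1).toNat indel_extend)
        match_idxs mismatch_idxs insert_idxs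
        (delete_idxs ++ PySem.List.pyRange t_idx (t_idx + pvIntA num) 1)
        (t_idx + pvIntA num) match_ mismatch indel_start indel_extend
    else if c = 'N' ∨ c = 'X' then
      pvLoopA rest [] (score + (mismatch + pvIntA num))
        (idx_scores ++ List.replicate (pvIntA num).toNat mismatch)
        match_idxs
        (mismatch_idxs ++ PySem.List.pyRange t_idx (t_idx + pvIntA num) 1)
        insert_idxs delete_idxs
        (t_idx + pvIntA num) match_ mismatch indel_start indel_extend
    else if c = 'I' then
      pvLoopA rest []
        (score + (indel_extend * (pvIntA num - 1) + indel_start))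
        (pvBumpLastA idx_scores (indel_extend * (pvIntA num - 1) + indel_start))
        match_idxs mismatch_idxs (insert_idxs ++ [t_idx]) delete_idxs
        t_idx match_ mismatch indel_start indel_extend
    else
      pvLoopA rest [] score idx_scores match_idxs mismatch_idxs insert_idxs delete_idxs
        t_idx match_ mismatch indel_start indel_extend

-- (the final `assert` holds on every input Pre_ admits; it produces no value)
def score_cigar (s : String) (t_idx : Int) (match_ : Int) (mismatch : Int) (indel_start : Int) (indel_extend : Int) : Int × List Int × List Int × List Int × List Int × List Int :=
  pvLoopA s.toList [] 0 [] [] [] [] [] t_idx match_ mismatch indel_start indel_extend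

-- ===== PORT B =====
-- hand port of re.finditer(r'(\d*)(\D)', s): exact, because the regex's non-overlapping left-to-right
-- matches are precisely each maximal digit run followed by the one non-digit character after it
def pvTokensB (cs : List Char) (acc : List Char) : List (List Char × Char) :=
  match cs with
  | [] => []
  | c :: rest => if c.isDigit then pvTokensB rest (acc ++ [c]) else (acc, c) :: pvTokensB rest []

-- idx_scores[-1] += v of Source B; IndexError on [] excluded by Pre_ (returns xs unchanged there)
def pvSetLastB (xs : List Int) (v : Int) : List Int :=
  match xs.getLast? with
  | some last => xs.dropLast ++ [last + v]
  | none => xs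

-- one iteration of Source B's for-loop over the token list
def pvStepB (match_ mismatch indel_start indel_extend : Int) :
    (Int × List Int × List Int × List Int × List Int × List Int × Int) → (List Char × Char) →
    Int × List Int × List Int × List Int × List Int × List Int × Int
  | (score, idx_scores, match_idxs, mismatch_idxs, insert_idxs, delete_idxs, t_idx), (num, op) =>
    if op = 'M' ∨ op = '=' then
      let n := (PySem.Int.ofChars? num).getD 0
      (score + match_ * n, idx_scores ++ List.replicate n.toNat match_,
       match_idxs ++ PySem.List.pyRange t_idx (t_idx + n) 1,
       mismatch_idxs, insert_idxs, delete_idxs, t_idx + n)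
    else if op = 'D' then
      let n := (PySem.Int.ofChars? num).getD 0
      (score + (indel_extend * (n - 1) + indel_start),
       idx_scores ++ ([indel_start] ++ List.replicate (n - 1).toNat indel_extend),
       match_idxs, mismatch_idxs, insert_idxs,
       delete_idxs ++ PySem.List.pyRange t_idx (t_idx + n) 1, t_idx + n)
    else if op = 'N' ∨ op = 'X' then
      let n := (PySem.Int.ofChars? num).getD 0
      (score + (mismatch + n), idx_scores ++ List.replicate n.toNat mismatch,
       match_idxs, mismatch_idxs ++ PySem.List.pyRange t_idx (t_idx + n) 1,
       insert_idxs, delete_idxs, t_idx + n)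
    else if op = 'I' then
      let n := (PySem.Int.ofChars? num).getD 0
      let insert_cost := indel_extend * (n - 1) + indel_start
      (score + insert_cost, pvSetLastB idx_scores insert_cost,
       match_idxs, mismatch_idxs, insert_idxs ++ [t_idx], delete_idxs, t_idx)
    else
      (score, idx_scores, match_idxs, mismatch_idxs, insert_idxs, delete_idxs, t_idx)

-- drop the running t_idx from the fold state (Python returns the six results)
def pvFinishB (st : Int × List Int × List Int × List Int × List Int × List Int × Int) :
    Int × List Int × List Int × List Int × List Int × List Int :=
  (st.1, st.2.1, st.2.2.1, st.2.2.2.1, st.2.2.2.2.1, st.2.2.2.2.2.1)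

def score_cigar_alt (s : String) (t_idx : Int) (match_ : Int) (mismatch : Int) (indel_start : Int) (indel_extend : Int) : Int × List Int × List Int × List Int × List Int × List Int :=
  pvFinishB ((pvTokensB s.toList []).foldl (pvStepB match_ mismatch indel_start indel_extend)
    (0, [], [], [], [], [], t_idx))

-- ===== PRECONDITION & SPEC =====
-- helpers for Pre_ only (independent of both ports; positional conditions on the characters of s)
def pvIsOpChar (c : Char) : Bool := c == 'M' || c == '=' || c == 'D' || c == 'N' || c == 'X' || c == 'I'

-- the digit run ending just before position j spells a number ≥ 1 (it contains a nonzero digit)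
def pvPosCount (l : List Char) (j : Nat) : Bool :=
  (List.range j).any (fun k => (List.range' k (j - k)).all (fun m => l[m]!.isDigit) && l[k]! != '0')

-- position k holds an op that leaves idx_scores nonempty (D always; M/=/N/X when its count is ≥ 1)
def pvScoringAt (l : List Char) (k : Nat) : Bool :=
  !(l[k]!.isDigit) &&
    (l[k]! == 'D' || ((l[k]! == 'M' || l[k]! == '=' || l[k]! == 'N' || l[k]! == 'X') && pvPosCount l k))

-- Pre_ is exactly where Python A returns: every recognized op character is immediately preceded by a
-- digit (else int('') → ValueError), every D count is ≥ 1 (else the final assert fails), and every I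
-- has an earlier op that put something into idx_scores (else idx_scores[-1] → IndexError).
def Pre_score_cigar (s : String) (t_idx : Int) (match_ : Int) (mismatch : Int) (indel_start : Int) (indel_extend : Int) : Prop :=
  ∀ j, j < s.toList.length → s.toList[j]!.isDigit = false →
    ((pvIsOpChar s.toList[j]! = true → 1 ≤ j ∧ s.toList[j - 1]!.isDigit = true) ∧
     (s.toList[j]! = 'D' → pvPosCount s.toList j = true) ∧
     (s.toList[j]! = 'I' → ∃ k, k < j ∧ pvScoringAt s.toList k = true))

instance (s : String) (t_idx : Int) (match_ : Int) (mismatch : Int) (indel_start : Int) (indel_extend : Int) : Decidable (Pre_score_cigar s t_idx match_ mismatch indel_start indel_extend) := by unfold Pre_score_cigar; infer_instance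

def pvWitness_score_cigar : String × Int × Int × Int × Int × Int := ("3M1I2D", 5, 2, -4, -2, -1)

def Spec_score_cigar (s : String) (t_idx : Int) (match_ : Int) (mismatch : Int) (indel_start : Int) (indel_extend : Int) (out : Int × List Int × List Int × List Int × List Int × List Int) : Prop := out = score_cigar_alt s t_idx match_ mismatch indel_start indel_extend
instance (s : String) (t_idx : Int) (match_ : Int) (mismatch : Int) (indel_start : Int) (indel_extend : Int) (out : Int × List Int × List Int × List Int × List Int × List Int) : Decidable (Spec_score_cigar s t_idx match_ mismatch indel_start indel_extend out) := by unfold Spec_score_cigar; infer_instance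

-- ===== CLAIM (what is proved, stated in full; the proofs are below) =====
def Claim_equal_score_cigar : Prop := ∀ (s : String) (t_idx : Int) (match_ : Int) (mismatch : Int) (indel_start : Int) (indel_extend : Int), Dom_score_cigar s t_idx match_ mismatch indel_start indel_extend → Pre_score_cigar s t_idx match_ mismatch indel_start indel_extend → Spec_score_cigar s t_idx match_ mismatch indel_start indel_extend (score_cigar s t_idx match_ mismatch indel_start indel_extend)

-- ===== LEMMAS AND PROOFS =====

-- the two ports' last-element bumps agree (A indexes with Python's -1, B uses getLast?)
theorem pvBumpLastA_eq_setLastB (xs : List Int) (v : Int) : pvBumpLastA xs v = pvSetLastB xs v := by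
  simp [pvBumpLastA, pvSetLastB, PySem.List.pyGet?_neg_one]

-- main invariant: A's character loop computes B's fold over the tokens of the remaining characters,
-- started from the same state, for every digit accumulator `num`
theorem pvLoopA_eq_foldB (cs : List Char) :
    ∀ (num : List Char) (score : Int) (i m x ins d : List Int) (t M MM IS IE : Int),
      pvLoopA cs num score i m x ins d t M MM IS IE =
        pvFinishB ((pvTokensB cs num).foldl (pvStepB M MM IS IE) (score, i, m, x, ins, d, t)) := by
  induction cs with
  | nil => intros; rfl
  | cons c rest ih =>
    intro num score i m x ins d t M MM IS IE
    by_cases hd : c.isDigit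
    · simp only [pvLoopA, pvTokensB, hd, if_true]
      exact ih (num ++ [c]) score i m x ins d t M MM IS IE
    · have htok : pvTokensB (c :: rest) num = (num, c) :: pvTokensB rest [] := by
        simp [pvTokensB, hd]
      rw [htok, List.foldl_cons]
      simp only [pvLoopA]
      rw [if_neg hd]
      simp only [pvStepB, pvIntA, pvBumpLastA_eq_setLastB]
      split_ifs with h1 h2 h3 h4 <;> (try simp only [List.append_assoc]) <;> exact ih ..

theorem score_cigar_spec : Claim_equal_score_cigar := by
  intro s t_idx match_ mismatch indel_start indel_extend _dom _pre
  unfold Spec_score_cigar score_cigar score_cigar_alt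
  exact pvLoopA_eq_foldB s.toList [] 0 [] [] [] [] [] t_idx match_ mismatch indel_start indel_extend
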